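-- pv_equiv track=rewrite | github.com/ttheikki/lukujarjestys | lukujarjtools.py | toistuvat_kurssit
-- ===== SOURCE A (Python) =====
-- def toistuvat_kurssit(list1):
--     nahty = {}
--     toistuvat = []
--
--     for row in list1:
--         for item in row:
--             for x in item:
--                 if x not in nahty:
--                     nahty[x] = 1
--                 else:
--                     if nahty[x] == 1:
--                         toistuvat.append(x)
--                     nahty[x] += 1
--     return toistuvat, nahty
-- ===== SOURCE B (Python) =====
-- def toistuvat_kurssit(list1):
--     flat = [x for row in list1 for item in row for x in item]
--     nahty = {}
--     for x in flat:
--         nahty[x] = nahty.get(x, 0) + 1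
--     toistuvat = []
--     seen = set()
--     emitted = set()
--     for x in flat:
--         if x in seen and x not in emitted:
--             toistuvat.append(x)
--             emitted.add(x)
--         else:
--             seen.add(x)
--     return toistuvat, nahty
-- ===== Notes on version B (the rewrite author's own statement) =====
-- stated objective: alternative
-- what changed: A's single fused triple-nested loop that counts and detects duplicates in one dict is replaced by a flatten-first two-pass design: one pass builds the count dict over the flattened items, a separate pass with seen/emitted sets emits each item at its second sighting.
import Mathlib
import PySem

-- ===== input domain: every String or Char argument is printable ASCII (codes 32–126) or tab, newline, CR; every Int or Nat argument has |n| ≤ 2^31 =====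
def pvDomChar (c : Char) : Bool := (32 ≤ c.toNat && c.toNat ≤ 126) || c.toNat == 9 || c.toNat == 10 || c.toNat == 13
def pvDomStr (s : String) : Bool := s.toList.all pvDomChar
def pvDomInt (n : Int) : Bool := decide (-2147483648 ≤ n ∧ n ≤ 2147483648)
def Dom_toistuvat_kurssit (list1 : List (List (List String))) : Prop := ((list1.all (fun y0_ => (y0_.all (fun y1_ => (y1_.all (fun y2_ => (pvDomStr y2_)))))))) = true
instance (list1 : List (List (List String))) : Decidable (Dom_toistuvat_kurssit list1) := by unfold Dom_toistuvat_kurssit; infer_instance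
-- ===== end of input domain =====

-- B replaces A's fused count-and-detect triple loop with a flatten-first two-pass design (same cost): alternative decomposition.

-- ===== PORT A =====
-- inner step of A's fused loop: update dict, append on second sighting
def tkStepA (s : PySem.Dict String Int × List String) (x : String) :
    PySem.Dict String Int × List String :=
  if s.1.contains x = false then (s.1.insert x 1, s.2)
  else (s.1.insert x (s.1.getD x 0 + 1), if s.1.getD x 0 == 1 then s.2 ++ [x] else s.2)

def toistuvat_kurssit (list1 : List (List (List String))) : List String × (List (String × Int)) :=
  let s := list1.foldl (fun s row => row.foldl (fun s item => item.foldl tkStepA s) s)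
    ((PySem.Dict.empty : PySem.Dict String Int), ([] : List String))
  (s.2, s.1.items)

-- ===== PORT B =====
-- second-pass step: emit at second sighting (in seen, not yet emitted)
def tkStepB (s : List String × PySem.Set String × PySem.Set String) (x : String) :
    List String × PySem.Set String × PySem.Set String :=
  if PySem.Set.contains s.2.1 x && !(PySem.Set.contains s.2.2 x) then
    (s.1 ++ [x], s.2.1, PySem.Set.add s.2.2 x)
  else (s.1, PySem.Set.add s.2.1 x, s.2.2)

def toistuvat_kurssit_alt (list1 : List (List (List String))) : List String × (List (String × Int)) :=
  let flat := list1.flatMap (fun row => row.flatMap (fun item => item))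
  let nahty := flat.foldl (fun d x => d.insert x (d.getD x 0 + 1)) (PySem.Dict.empty : PySem.Dict String Int)
  let s := flat.foldl tkStepB (([] : List String), (PySem.Set.empty : PySem.Set String), (PySem.Set.empty : PySem.Set String))
  (s.1, nahty.items)

-- ===== PRECONDITION & SPEC =====
def Spec_toistuvat_kurssit (list1 : List (List (List String))) (out : List String × (List (String × Int))) : Prop := out = toistuvat_kurssit_alt list1
instance (list1 : List (List (List String))) (out : List String × (List (String × Int))) : Decidable (Spec_toistuvat_kurssit list1 out) := by unfold Spec_toistuvat_kurssit; infer_instance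

-- ===== CLAIM (what is proved, stated in full; the proofs are below) =====
def Claim_equal_toistuvat_kurssit : Prop := ∀ (list1 : List (List (List String))), Dom_toistuvat_kurssit list1 → Spec_toistuvat_kurssit list1 (toistuvat_kurssit list1)

-- ===== LEMMAS AND PROOFS =====

-- the invariant tying A's dict to B's seen/emitted sets
def tkInv (d : PySem.Dict String Int) (seen emitted : PySem.Set String) : Prop :=
  ∀ x : String, ((x ∈ seen) ↔ d.contains x = true) ∧
    ((x ∈ emitted) ↔ 2 ≤ d.getD x 0) ∧
    (d.contains x = true → 1 ≤ d.getD x 0)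

theorem tkInv_empty : tkInv PySem.Dict.empty PySem.Set.empty PySem.Set.empty := by
  intro x
  refine ⟨?_, ?_, by simp⟩ <;>
    simp [PySem.Set.empty, PySem.Dict.getD_empty, PySem.Dict.contains_empty]

-- A's fused nested loop is the fold of tkStepA over the flattened list
theorem tkStepA_flatten (list1 : List (List (List String)))
    (s : PySem.Dict String Int × List String) :
    list1.foldl (fun s row => row.foldl (fun s item => item.foldl tkStepA s) s) s
      = (list1.flatMap (fun row => row.flatMap (fun item => item))).foldl tkStepA s := by
  induction list1 generalizing s with
  | nil => rfl
  | cons row rest ih =>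
    simp only [List.foldl_cons, List.flatMap_cons, List.foldl_append, ih]
    congr 1
    induction row generalizing s with
    | nil => rfl
    | cons item rest2 ih2 =>
      simp only [List.foldl_cons, List.flatMap_cons, List.foldl_append, ih2]

-- one joint step keeps the two programs in lockstep and preserves the invariant
theorem tkStep_sync (d : PySem.Dict String Int) (t : List String)
    (seen emitted : PySem.Set String) (x : String) (h : tkInv d seen emitted) :
    tkStepA (d, t) x = (d.insert x (d.getD x 0 + 1), (tkStepB (t, seen, emitted) x).1) ∧
    tkInv (d.insert x (d.getD x 0 + 1)) (tkStepB (t, seen, emitted) x).2.1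
      (tkStepB (t, seen, emitted) x).2.2 := by
  obtain ⟨hseen, hem, hpos⟩ := h x
  by_cases hc : d.contains x = true
  · have hxseen : x ∈ seen := hseen.mpr hc
    have h1 : 1 ≤ d.getD x 0 := hpos hc
    by_cases h1' : d.getD x 0 = 1
    · -- second sighting: A appends; B's condition fires
      have hxem : x ∉ emitted := fun h' => by have := hem.mp h'; omega
      have hB : tkStepB (t, seen, emitted) x = (t ++ [x], seen, PySem.Set.add emitted x) := by
        simp only [tkStepB]
        rw [if_pos (show (PySem.Set.contains seen x && !PySem.Set.contains emitted x) = true by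
          simp [hxseen, hxem])]
      refine ⟨?_, ?_⟩
      · rw [hB]; simp [tkStepA, hc, h1']
      · rw [hB]
        intro y
        obtain ⟨hseeny, hemy, hposy⟩ := h y
        by_cases hyx : y = x
        · subst hyx
          refine ⟨?_, ?_, ?_⟩
          · simp [hxseen]
          · simp [PySem.Set.mem_add, h1']
          · intro _; simp; omega
        · refine ⟨?_, ?_, ?_⟩
          · simp [PySem.Dict.contains_insert, hyx, hseeny]
          · simp [PySem.Dict.getD_insert, hyx, PySem.Set.mem_add, hemy]
          · intro hcy
            rw [PySem.Dict.contains_insert] at hcy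
            simp [hyx] at hcy
            simpa [PySem.Dict.getD_insert, hyx] using hposy hcy
    · -- third-or-later sighting: both leave toistuvat alone
      have h2 : 2 ≤ d.getD x 0 := by omega
      have hxem : x ∈ emitted := hem.mpr h2
      have hB : tkStepB (t, seen, emitted) x = (t, PySem.Set.add seen x, emitted) := by
        simp only [tkStepB]
        rw [if_neg (show ¬((PySem.Set.contains seen x && !PySem.Set.contains emitted x) = true) by
          simp [hxseen, hxem])]
      refine ⟨?_, ?_⟩
      · rw [hB]; simp [tkStepA, hc, h1']
      · rw [hB]
        intro y
        obtain ⟨hseeny, hemy, hposy⟩ := h y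
        by_cases hyx : y = x
        · subst hyx
          refine ⟨?_, ?_, ?_⟩
          · simp [PySem.Set.mem_add]
          · simp [hxem]; omega
          · intro _; simp; omega
        · refine ⟨?_, ?_, ?_⟩
          · simp [PySem.Dict.contains_insert, hyx, PySem.Set.mem_add, hseeny]
          · simp [PySem.Dict.getD_insert, hyx, hemy]
          · intro hcy
            rw [PySem.Dict.contains_insert] at hcy
            simp [hyx] at hcy
            simpa [PySem.Dict.getD_insert, hyx] using hposy hcy
  · -- first sighting
    have hc' : d.contains x = false := by simpa using hc
    have hg0 : d.getD x 0 = 0 := PySem.Dict.getD_of_not_contains d 0 hc'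
    have hxseen : x ∉ seen := fun h' => hc (hseen.mp h')
    have hxem : x ∉ emitted := fun h' => by have := hem.mp h'; omega
    have hB : tkStepB (t, seen, emitted) x = (t, PySem.Set.add seen x, emitted) := by
      simp only [tkStepB]
      rw [if_neg (show ¬((PySem.Set.contains seen x && !PySem.Set.contains emitted x) = true) by
        simp [hxseen])]
    refine ⟨?_, ?_⟩
    · rw [hB]; simp [tkStepA, hc', hg0]
    · rw [hB]
      intro y
      obtain ⟨hseeny, hemy, hposy⟩ := h y
      by_cases hyx : y = x
      · subst hyx
        refine ⟨?_, ?_, ?_⟩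
        · simp [PySem.Set.mem_add]
        · simp [hg0, hxem]
        · intro _; simp [hg0]
      · refine ⟨?_, ?_, ?_⟩
        · simp [PySem.Dict.contains_insert, hyx, PySem.Set.mem_add, hseeny]
        · simp [PySem.Dict.getD_insert, hyx, hemy]
        · intro hcy
          rw [PySem.Dict.contains_insert] at hcy
          simp [hyx] at hcy
          simpa [PySem.Dict.getD_insert, hyx] using hposy hcy

-- main lockstep lemma over the flat list
theorem tk_main (l : List String) (d : PySem.Dict String Int) (t : List String)
    (seen emitted : PySem.Set String) (h : tkInv d seen emitted) :
    l.foldl tkStepA (d, t) =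
      (l.foldl (fun d x => d.insert x (d.getD x 0 + 1)) d, (l.foldl tkStepB (t, seen, emitted)).1) := by
  induction l generalizing d t seen emitted with
  | nil => rfl
  | cons x rest ih =>
    obtain ⟨hstep, hinv⟩ := tkStep_sync d t seen emitted x h
    simp only [List.foldl_cons, hstep]
    exact ih (d.insert x (d.getD x 0 + 1)) (tkStepB (t, seen, emitted) x).1
      (tkStepB (t, seen, emitted) x).2.1 (tkStepB (t, seen, emitted) x).2.2 hinv

-- ===== VERDICT (by name: the statement is the Claim_ definition above) =====
theorem toistuvat_kurssit_spec : Claim_equal_toistuvat_kurssit := by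
  intro list1 _
  unfold Spec_toistuvat_kurssit toistuvat_kurssit toistuvat_kurssit_alt
  simp only [tkStepA_flatten]
  rw [tk_main _ _ _ _ _ tkInv_empty]
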